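-- pv_equiv track=rewrite | github.com/marxsk/deep-nlp | preprocessor.py | _add_terminals_for_naive_semtypes
-- ===== SOURCE A (Python) =====
-- GENERATED_LINE = -1
--
-- def _add_terminals_for_naive_semtypes(rules_by_line, semantic_types):
--     """ Add terminals for each semantic types/token
--
--     Only naive semantic types are added but they have to accept combined ones. This is the
--     way how to handle ambiguity inside the grammar. Ambiguity of lemmas is not resolved here.
--     The main issue is that we should generate all combinations of semantic types from USED words.
--     So, processing of the data should be done twice (generate semtypes; generate grammar).
--
--     @todo: ambiguity on the lemma level should be resolved in grammar as well
--     """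
--     output = []
--
--     if semantic_types is None:
--         return output
--
--     for semtype in semantic_types:
--         simple_types_count = len(semtype.split('^'))
--
--         if simple_types_count != 1:
--             # do not create new terminals for combined semantic classes
--             # instead add this 'string-token' into existing naive one
--             continue
--
--         terminal_semtype = semtype.upper()[1:]
--         rules_by_line[terminal_semtype] = GENERATED_LINE
--         tokens = []
--         for semantic_type in semantic_types:
--             if semtype in semantic_type:
--                 tokens.append(semantic_type)
--         tokens.sort()
--         output.append('%s: %s' % (terminal_semtype,
--                                   " | ".join(['"%s"' % (s) for s in tokens])))
--
--     return output
-- ===== SOURCE B (Python) =====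
-- GENERATED_LINE = -1
--
--
-- def _add_terminals_for_naive_semtypes(rules_by_line, semantic_types):
--     """Bucket-distribution strategy: a single pass over sorted(semantic_types)
--     distributes each type into per-simple-type buckets kept parallel to the
--     simple types (so token lists come out already sorted), then one formatting
--     pass builds the rules.  Mutates rules_by_line exactly like A.
--     """
--     output = []
--     if semantic_types is None:
--         return output
--
--     simples = [s for s in semantic_types if '^' not in s]
--     buckets = [[] for _ in simples]
--     for t in sorted(semantic_types):
--         for s, b in zip(simples, buckets):
--             if s in t:
--                 b.append(t)
--
--     for s, toks in zip(simples, buckets):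
--         terminal = s.upper()[1:]
--         rules_by_line[terminal] = GENERATED_LINE
--         output.append('%s: %s' % (terminal,
--                                   ' | '.join('"%s"' % t for t in toks)))
--     return output
-- ===== Notes on version B (the rewrite author's own statement) =====
-- stated objective: alternative
-- what changed: B inverts the loop nesting: instead of A's per-simple-type inner scan over all semantic_types followed by a sort, B makes one pass over sorted(semantic_types) distributing each type into buckets kept parallel to the simple types (token lists come out already sorted), then a single formatting pass builds the rules.
import Mathlib
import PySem

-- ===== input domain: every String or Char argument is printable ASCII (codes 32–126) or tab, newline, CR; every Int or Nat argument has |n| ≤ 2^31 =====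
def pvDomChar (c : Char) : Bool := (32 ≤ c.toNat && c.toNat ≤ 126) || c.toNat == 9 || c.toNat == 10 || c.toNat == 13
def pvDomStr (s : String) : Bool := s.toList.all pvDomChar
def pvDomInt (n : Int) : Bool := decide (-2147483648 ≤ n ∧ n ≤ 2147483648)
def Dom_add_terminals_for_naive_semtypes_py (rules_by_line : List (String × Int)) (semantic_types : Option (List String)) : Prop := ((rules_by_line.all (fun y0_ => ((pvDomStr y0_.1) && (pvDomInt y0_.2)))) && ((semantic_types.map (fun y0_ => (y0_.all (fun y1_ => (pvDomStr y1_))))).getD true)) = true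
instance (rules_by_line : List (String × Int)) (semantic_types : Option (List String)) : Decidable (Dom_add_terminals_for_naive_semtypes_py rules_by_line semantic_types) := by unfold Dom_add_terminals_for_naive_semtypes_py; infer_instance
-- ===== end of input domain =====

-- B inverts the loops: one pass over sorted(semantic_types) distributes each type into
-- buckets parallel to the simple types, then one formatting pass; A's per-terminal
-- collect-then-sort disappears.  Both Pythons mutate rules_by_line identically; the
-- equivalence proved here is about the return value.

-- ===== PORT A =====
-- loop body of A's 'for semtype in semantic_types' (state = (rules_by_line dict, output))
def pvStepA (sts : List String) (st : PySem.Dict String Int × List String) (semtype : String) : PySem.Dict String Int × List String :=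
  if ((PySem.Str.split? semtype "^").getD []).length ≠ 1 then st
  else
    let terminal := PySem.Str.slice (PySem.Str.upper semtype) (some 1) none
    let rules := st.1.insert terminal (-1)
    let tokens := sts.foldl (fun acc t => if PySem.Str.isIn semtype t then acc ++ [t] else acc) ([] : List String)
    let tokens := PySem.List.sorted tokens (fun x => x) false
    (rules, st.2 ++ [PySem.Str.join "" [terminal, ": ",
      PySem.Str.join " | " (tokens.map (fun s => PySem.Str.join "" ["\"", s, "\""]))]])

def add_terminals_for_naive_semtypes_py (rules_by_line : List (String × Int)) (semantic_types : Option (List String)) : List String :=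
  match semantic_types with
  | none => []
  | some sts => (sts.foldl (pvStepA sts) (PySem.Dict.ofList rules_by_line, ([] : List String))).2

-- ===== PORT B =====
-- B's inner loop over zip(simples, buckets) for one sorted token t: each matching bucket
-- gets t appended (in-place list mutation rendered as the resulting buckets list)
def pvDistB (simples : List String) (bs : List (List String)) (t : String) : List (List String) :=
  (simples.zip bs).map (fun p => if PySem.Str.isIn p.1 t then p.2 ++ [t] else p.2)

-- body of B's final formatting loop over zip(simples, buckets)
def pvEmitB (st : PySem.Dict String Int × List String) (p : String × List String) : PySem.Dict String Int × List String :=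
  let terminal := PySem.Str.slice (PySem.Str.upper p.1) (some 1) none
  (st.1.insert terminal (-1),
   st.2 ++ [PySem.Str.join "" [terminal, ": ",
     PySem.Str.join " | " (p.2.map (fun t => PySem.Str.join "" ["\"", t, "\""]))]])

def add_terminals_for_naive_semtypes_py_alt (rules_by_line : List (String × Int)) (semantic_types : Option (List String)) : List String :=
  match semantic_types with
  | none => []
  | some sts =>
    let simples := sts.filter (fun s => !PySem.Str.isIn "^" s)
    let buckets0 : List (List String) := simples.map (fun _ => [])
    let buckets := (PySem.List.sorted sts (fun x => x) false).foldl (pvDistB simples) buckets0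
    ((simples.zip buckets).foldl pvEmitB (PySem.Dict.ofList rules_by_line, ([] : List String))).2

-- ===== PRECONDITION & SPEC =====
def Spec_add_terminals_for_naive_semtypes_py (rules_by_line : List (String × Int)) (semantic_types : Option (List String)) (out : List String) : Prop := out = add_terminals_for_naive_semtypes_py_alt rules_by_line semantic_types
instance (rules_by_line : List (String × Int)) (semantic_types : Option (List String)) (out : List String) : Decidable (Spec_add_terminals_for_naive_semtypes_py rules_by_line semantic_types out) := by unfold Spec_add_terminals_for_naive_semtypes_py; infer_instance

-- ===== CLAIM (what is proved, stated in full; the proofs are below) =====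
def Claim_equal_add_terminals_for_naive_semtypes_py : Prop := ∀ (rules_by_line : List (String × Int)) (semantic_types : Option (List String)), Dom_add_terminals_for_naive_semtypes_py rules_by_line semantic_types → Spec_add_terminals_for_naive_semtypes_py rules_by_line semantic_types (add_terminals_for_naive_semtypes_py rules_by_line semantic_types)

-- ===== LEMMAS AND PROOFS =====

-- one unfolding step of splitOn.go on a non-empty remainder (definitional)
lemma pv_go_cons (sep : List Char) (n : Nat) (c : Char) (rest cur : List Char) (acc : List (List Char)) :
    PySem.Chars.splitOn.go sep (n+1) (c :: rest) cur acc =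
      if sep.isPrefixOf (c :: rest) then PySem.Chars.splitOn.go sep n (List.drop sep.length (c :: rest)) [] (cur.reverse :: acc)
      else PySem.Chars.splitOn.go sep n rest (c :: cur) acc := rfl

-- every run of splitOn.go produces at least one piece more than acc already holds
lemma pv_go_len_ge (sep : List Char) (fuel : Nat) : ∀ (l cur : List Char) (acc : List (List Char)),
    acc.length + 1 ≤ (PySem.Chars.splitOn.go sep fuel l cur acc).length := by
  induction fuel with
  | zero => intro l cur acc; simp [PySem.Chars.splitOn.go]
  | succ n ih =>
    intro l cur acc
    cases l with
    | nil => simp [PySem.Chars.splitOn.go]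
    | cons c rest =>
      rw [pv_go_cons]
      split
      · have h := ih (List.drop sep.length (c :: rest)) [] (cur.reverse :: acc)
        simp at h; omega
      · exact ih rest (c :: cur) acc

-- when the separator does not occur, go returns the single remaining piece
lemma pv_go_no_occ (sep : List Char) (fuel : Nat) : ∀ (l cur : List Char) (acc : List (List Char)),
    ¬ sep <:+: l → PySem.Chars.splitOn.go sep fuel l cur acc = ((cur.reverse ++ l) :: acc).reverse := by
  induction fuel with
  | zero => intro l cur acc _; rfl
  | succ n ih =>
    intro l cur acc h
    cases l with
    | nil =>
      rw [show PySem.Chars.splitOn.go sep (n+1) [] cur acc = (cur.reverse :: acc).reverse from rfl]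
      simp
    | cons c rest =>
      rw [pv_go_cons]
      rw [if_neg (fun hp => h ((List.isPrefixOf_iff_prefix.mp hp).isInfix))]
      rw [ih rest (c :: cur) acc (fun hi => h (List.infix_cons_iff.mpr (Or.inr hi)))]
      simp

-- when the separator does occur (and enough fuel is left), at least two pieces come out
lemma pv_go_occ (sep : List Char) (hsep : sep ≠ []) : ∀ (fuel : Nat) (l cur : List Char) (acc : List (List Char)),
    l.length ≤ fuel → sep <:+: l → acc.length + 2 ≤ (PySem.Chars.splitOn.go sep fuel l cur acc).length := by
  intro fuel
  induction fuel with
  | zero =>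
    intro l cur acc hl hocc
    have hnil : l = [] := List.eq_nil_of_length_eq_zero (Nat.le_zero.mp hl)
    subst hnil
    exact absurd (List.eq_nil_of_infix_nil hocc) hsep
  | succ n ih =>
    intro l cur acc hl hocc
    cases l with
    | nil => exact absurd (List.eq_nil_of_infix_nil hocc) hsep
    | cons c rest =>
      rw [pv_go_cons]
      split
      · have h := pv_go_len_ge sep n (List.drop sep.length (c :: rest)) [] (cur.reverse :: acc)
        simp at h; omega
      · next hp =>
        rcases List.infix_cons_iff.mp hocc with hpre | hinf
        · exact absurd (List.isPrefixOf_iff_prefix.mpr hpre) (by simpa using hp)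
        · exact ih rest (c :: cur) acc (by simp at hl; omega) hinf

-- A's combined-type test len(s.split('^')) != 1 is exactly B's '^' in s
lemma pv_guard_iff (s : String) :
    (((PySem.Str.split? s "^").getD []).length ≠ 1) ↔ PySem.Str.isIn "^" s = true := by
  have hsplit : ((PySem.Str.split? s "^").getD []).length = (PySem.Chars.splitOn s.toList ['^']).length := by
    simp [PySem.Str.split?, PySem.Chars.split?]
  rw [hsplit, PySem.Str.isIn_eq]
  show _ ↔ PySem.Chars.isIn ['^'] s.toList = true
  constructor
  · intro h
    cases hni : PySem.Chars.isIn ['^'] s.toList with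
    | true => rfl
    | false =>
      exfalso
      have hno : ¬ (['^'] <:+: s.toList) := (PySem.Chars.isIn_eq_false_iff _ _).mp hni
      have hgo := pv_go_no_occ ['^'] (s.toList.length + 1) s.toList [] [] hno
      exact h (by unfold PySem.Chars.splitOn; rw [hgo]; simp)
  · intro h hlen
    have hocc : ['^'] <:+: s.toList := (PySem.Chars.isIn_iff_infix _ _).mp h
    have hge := pv_go_occ ['^'] (by simp) (s.toList.length + 1) s.toList [] [] (by omega) hocc
    unfold PySem.Chars.splitOn at hlen
    simp only [List.length_nil] at hge
    omega

-- one unfolding step of insertBy on a non-empty list (definitional)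
lemma pv_insertBy_cons (before : String → String → Bool) (x y : String) (ys : List String) :
    PySem.List.insertBy before x (y :: ys) =
      if before x y then x :: y :: ys else y :: PySem.List.insertBy before x ys := rfl

-- inserting an element smaller than everything present puts it in front
lemma pv_insertBy_all_lt (x : String) (zs : List String) (h : ∀ z ∈ zs, x < z) :
    PySem.List.insertBy (fun a b => decide (a < b)) x zs = x :: zs := by
  cases zs with
  | nil => rfl
  | cons z t => rw [pv_insertBy_cons, if_pos (by simpa using h z (by simp))]

-- filtering commutes with a single insertion step into an ordered list
lemma pv_filter_insertBy (p : String → Bool) (x : String) : ∀ (ys : List String),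
    ys.Pairwise (· ≤ ·) →
    (PySem.List.insertBy (fun a b => decide (a < b)) x ys).filter p =
      if p x then PySem.List.insertBy (fun a b => decide (a < b)) x (ys.filter p) else ys.filter p := by
  intro ys
  induction ys with
  | nil => intro _; by_cases hp : p x <;> simp [PySem.List.insertBy, hp]
  | cons y t ih =>
    intro hpw
    have hpw' : t.Pairwise (· ≤ ·) := hpw.tail
    have hyle : ∀ z ∈ t, y ≤ z := fun z hz => List.rel_of_pairwise_cons hpw hz
    by_cases hb : x < y
    · rw [pv_insertBy_cons, if_pos (by simpa using hb)]
      by_cases hp : p x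
      · rw [List.filter_cons_of_pos hp, if_pos hp,
          pv_insertBy_all_lt x _ (fun z hz => by
            rcases List.mem_cons.mp (List.mem_of_mem_filter hz) with rfl | hzt
            · exact hb
            · exact lt_of_lt_of_le hb (hyle z hzt))]
      · rw [List.filter_cons_of_neg (by simpa using hp), if_neg hp]
    · rw [pv_insertBy_cons, if_neg (by simpa using hb)]
      by_cases hq : p y
      · rw [List.filter_cons_of_pos hq, ih hpw', List.filter_cons_of_pos hq]
        by_cases hp : p x
        · rw [if_pos hp, if_pos hp, pv_insertBy_cons, if_neg (by simpa using hb)]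
        · rw [if_neg hp, if_neg hp]
      · rw [List.filter_cons_of_neg (by simpa using hq), ih hpw',
          List.filter_cons_of_neg (by simpa using hq)]

-- filtering commutes with Python's stable sort (strings, identity key)
lemma pv_sorted_filter (p : String → Bool) (xs : List String) :
    PySem.List.sorted (xs.filter p) (fun x => x) false =
      (PySem.List.sorted xs (fun x => x) false).filter p := by
  have main : ∀ (l acc : List String), acc.Pairwise (· ≤ ·) →
      ((l.foldl (fun acc x => PySem.List.insertBy (fun a b => decide (a < b)) x acc) acc).filter p) =
        (l.filter p).foldl (fun acc x => PySem.List.insertBy (fun a b => decide (a < b)) x acc) (acc.filter p) := by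
    intro l
    induction l with
    | nil => intro acc _; rfl
    | cons a l ih =>
      intro acc hpw
      have hstep : (PySem.List.insertBy (fun a' b => decide (a' < b)) a acc).Pairwise (· ≤ ·) :=
        PySem.List.insertBy_pairwise_le (fun x => x) a acc hpw
      rw [List.foldl_cons, ih _ hstep, pv_filter_insertBy p a acc hpw]
      by_cases hp : p a
      · rw [if_pos hp, List.filter_cons_of_pos hp, List.foldl_cons]
      · rw [if_neg hp, List.filter_cons_of_neg (by simpa using hp)]
  have e1 := PySem.List.sorted_eq_foldl_insertBy (xs.filter p) (fun x => x)
  have e2 := PySem.List.sorted_eq_foldl_insertBy xs (fun x => x)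
  rw [e1, e2, main xs [] (by simp)]
  rfl

-- the formatted line, as a function of a simple type and its token list
def pvLine (s : String) (toks : List String) : String :=
  PySem.Str.join "" [PySem.Str.slice (PySem.Str.upper s) (some 1) none, ": ",
    PySem.Str.join " | " (toks.map (fun t => PySem.Str.join "" ["\"", t, "\""]))]

-- mapping over zip(simples, simples.map g) is mapping over simples
lemma pv_zip_map_self {β : Type} (simples : List String) (g : String → List String) (h : String → List String → β) :
    (simples.zip (simples.map g)).map (fun p => h p.1 p.2) = simples.map (fun s => h s (g s)) := by
  induction simples with
  | nil => rfl
  | cons a l ih => simp [List.zip_cons_cons, ih]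

-- the bucket fold computes, for each simple type, the ordered tokens containing it
lemma pv_buckets_eq (simples : List String) : ∀ (ordered : List String) (g : String → List String),
    ordered.foldl (pvDistB simples) (simples.map g) =
      simples.map (fun s => g s ++ ordered.filter (fun t => PySem.Str.isIn s t)) := by
  intro ordered
  induction ordered with
  | nil => intro g; simp
  | cons t rest ih =>
    intro g
    rw [List.foldl_cons]
    have hstep : pvDistB simples (simples.map g) t =
        simples.map (fun s => g s ++ if PySem.Str.isIn s t then [t] else []) := by
      rw [pvDistB]
      exact (pv_zip_map_self simples g (fun s b => if PySem.Str.isIn s t then b ++ [t] else b)).trans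
        (List.map_congr_left (fun s _ => by split <;> simp))
    rw [hstep, ih]
    exact List.map_congr_left (fun s _ => by
      rw [List.filter_cons]; split <;> simp)

-- the output component of A's fold is a map over the simple types
lemma pv_foldA_snd (sts : List String) : ∀ (l : List String) (d : PySem.Dict String Int) (out : List String),
    (l.foldl (pvStepA sts) (d, out)).2 =
      out ++ (l.filter (fun s => !PySem.Str.isIn "^" s)).map
        (fun s => pvLine s (PySem.List.sorted (sts.filter (fun t => PySem.Str.isIn s t)) (fun x => x) false)) := by
  intro l
  induction l with
  | nil => intro d out; simp
  | cons a l ih =>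
    intro d out
    rw [List.foldl_cons]
    by_cases h : PySem.Str.isIn "^" a = true
    · rw [show pvStepA sts (d, out) a = (d, out) from if_pos ((pv_guard_iff a).mpr h)]
      rw [ih, List.filter_cons_of_neg (by rw [h]; simp)]
    · have hg : ¬ (((PySem.Str.split? a "^").getD []).length ≠ 1) := fun hk => h ((pv_guard_iff a).mp hk)
      have hstep : pvStepA sts (d, out) a =
          (d.insert (PySem.Str.slice (PySem.Str.upper a) (some 1) none) (-1),
           out ++ [pvLine a (PySem.List.sorted (sts.filter (fun t => PySem.Str.isIn a t)) (fun x => x) false)]) := by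
        rw [pvStepA, if_neg hg]
        have htok : sts.foldl (fun acc t => if PySem.Str.isIn a t then acc ++ [t] else acc) ([] : List String)
            = sts.filter (fun t => PySem.Str.isIn a t) := by
          have := PySem.List.foldl_append_if (fun t => PySem.Str.isIn a t) (fun t => t) sts ([] : List String)
          simpa using this
        simp only [htok, pvLine]
      rw [hstep, ih, List.filter_cons_of_pos (by rw [Bool.eq_false_iff.mpr h]; simp), List.map_cons]
      simp

-- the output component of B's formatting fold is a map over zip(simples, buckets)
lemma pv_foldB_snd : ∀ (zs : List (String × List String)) (d : PySem.Dict String Int) (out : List String),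
    (zs.foldl pvEmitB (d, out)).2 = out ++ zs.map (fun p => pvLine p.1 p.2) := by
  intro zs
  induction zs with
  | nil => intro d out; simp
  | cons p l ih =>
    intro d out
    rw [List.foldl_cons]
    rw [show pvEmitB (d, out) p =
        (d.insert (PySem.Str.slice (PySem.Str.upper p.1) (some 1) none) (-1), out ++ [pvLine p.1 p.2]) from rfl]
    rw [ih]
    simp

-- ===== VERDICT (by name: the statement is the Claim_ definition above) =====
theorem add_terminals_for_naive_semtypes_py_spec : Claim_equal_add_terminals_for_naive_semtypes_py := by
  intro rules_by_line semantic_types _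
  unfold Spec_add_terminals_for_naive_semtypes_py
  cases semantic_types with
  | none => rfl
  | some sts =>
    show (sts.foldl (pvStepA sts) (PySem.Dict.ofList rules_by_line, ([] : List String))).2 = _
    rw [pv_foldA_snd sts sts (PySem.Dict.ofList rules_by_line) []]
    simp only [add_terminals_for_naive_semtypes_py_alt]
    rw [pv_buckets_eq _ _ (fun _ => []), pv_foldB_snd]
    have hz := pv_zip_map_self (sts.filter (fun s => !PySem.Str.isIn "^" s))
      (fun s => [] ++ (PySem.List.sorted sts (fun x => x) false).filter (fun t => PySem.Str.isIn s t))
      (fun s toks => pvLine s toks)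
    simp only [List.nil_append] at hz ⊢
    rw [hz]
    exact List.map_congr_left (fun s _ => by rw [pv_sorted_filter (fun t => PySem.Str.isIn s t) sts])
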